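-- pv_equiv track=rewrite | github.com/ProfLehman/advent_of_code | AOC_2024/day15/day15part2_ai.py | gpsCount
-- ===== SOURCE A (Python) =====
-- def gpsCount(map, width, height):
--     count = 0
--     for down in range(height):
--         for over in range(width):
--             if map.get(f"{over},{down}") == "[":
--                 # Calculate GPS coordinate for the left edge of the box
--                 gps = (down + 1) * 100 + (over + 1)
--                 count += gps
--     return count
-- ===== SOURCE B (Python) =====
-- def gpsCount(map, width, height):
--     total = 0
--     for key, value in map.items():
--         if value == "[":
--             over_s, down_s = key.split(",")
--             over, down = int(over_s), int(down_s)
--             if 0 <= over < width and 0 <= down < height: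
--                 total += (down + 1) * 100 + (over + 1)
--     return total
-- ===== Notes on version B (the rewrite author's own statement) =====
-- stated objective: faster
-- what changed: A scans all width*height grid cells and probes the dict with an f-string key per cell; B makes one pass over the dict entries, splitting each '['-valued key on ',' into int coordinates and bound-checking them, so cost depends on the number of entries instead of the grid area. …
-- outside the precondition, e.g. on gpsCount({'07,0': '['}, 9, 9): A returns 0, B returns 108; on gpsCount({'a,b': '['}, 2, 2): A returns 0, B raises ValueError
import Mathlib
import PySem

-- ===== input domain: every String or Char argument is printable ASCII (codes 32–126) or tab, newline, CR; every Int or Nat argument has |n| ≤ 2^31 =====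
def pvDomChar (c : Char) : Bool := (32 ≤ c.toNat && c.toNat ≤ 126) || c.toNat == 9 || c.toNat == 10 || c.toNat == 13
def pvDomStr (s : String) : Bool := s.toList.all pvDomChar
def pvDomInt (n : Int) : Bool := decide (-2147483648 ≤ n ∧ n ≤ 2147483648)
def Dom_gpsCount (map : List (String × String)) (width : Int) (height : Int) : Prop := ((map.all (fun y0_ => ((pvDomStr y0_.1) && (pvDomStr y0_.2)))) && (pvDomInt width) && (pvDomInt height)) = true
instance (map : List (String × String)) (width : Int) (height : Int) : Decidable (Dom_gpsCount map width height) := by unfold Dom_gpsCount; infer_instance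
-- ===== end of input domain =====

-- B replaces A's width×height grid scan (one dict probe per cell) by a single pass over the dict
-- entries, parsing each '['-valued key back into its two int coordinates and bound-checking them;
-- intended as faster (cost in the number of entries instead of the grid area).

-- ===== PORT A =====
-- A-side helper: dict.get on the association list (first match = the dict convention)
def pvLookup (map : List (String × String)) (k : String) : Option String :=
  match map with
  | [] => none
  | (k', v) :: rest => if k' = k then some v else pvLookup rest k

def gpsCount (map : List (String × String)) (width : Int) (height : Int) : Int :=
  (PySem.List.pyRange 0 height 1).foldl (fun count down =>
    (PySem.List.pyRange 0 width 1).foldl (fun count ov =>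
      if pvLookup map (PySem.Int.toStr ov ++ "," ++ PySem.Int.toStr down) = some "[" then
        count + ((down + 1) * 100 + (ov + 1))
      else count) count) 0

-- ===== PORT B =====
-- Source B's 'over_s, down_s = key.split(",")' raises unless the split has exactly two parts, and
-- 'int(...)' raises on non-int parts; both raising cases are excluded by Pre_gpsCount, so the
-- fallback branches below (returning the unchanged accumulator) are never reached on Pre_.
def gpsCount_alt (map : List (String × String)) (width : Int) (height : Int) : Int :=
  map.foldl (fun total kv =>
    if kv.2 = "[" then
      match PySem.Chars.splitOn kv.1.toList [','] with
      | [l, r] =>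
        match PySem.Int.ofChars? l, PySem.Int.ofChars? r with
        | some ov, some dn =>
          if 0 ≤ ov ∧ ov < width ∧ 0 ≤ dn ∧ dn < height then
            total + ((dn + 1) * 100 + (ov + 1))
          else total
        | _, _ => total
      | _ => total
    else total) 0

-- ===== PRECONDITION & SPEC =====
-- a key part is canonical when int() accepts it and str() of that value spells it back
def pvCanonPart (l : List Char) : Bool :=
  ((PySem.Int.ofChars? l).map (fun n => PySem.Int.toChars n == l)).getD false

-- a key is canonical when it is "over,down" with both parts canonical int spellings
def pvCanonKey (k : String) : Bool :=
  let parts := PySem.Chars.splitOn k.toList [',']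
  parts.length == 2 && pvCanonPart (parts.getD 0 []) && pvCanonPart (parts.getD 1 [])

-- Pre_ excludes association lists with duplicate keys (a Python dict cannot present them, so the
-- first-match order of the encoding is accidental) and maps holding a '['-valued entry whose key is
-- not the canonical "str(int),str(int)" form, on which A's grid probe silently skips the entry
-- while B's int() parse raises or accepts a non-canonical spelling such as "07".
def Pre_gpsCount (map : List (String × String)) (width : Int) (height : Int) : Prop :=
  (map.map Prod.fst).Nodup ∧ ∀ kv ∈ map, kv.2 = "[" → pvCanonKey kv.1 = true
instance (map : List (String × String)) (width : Int) (height : Int) : Decidable (Pre_gpsCount map width height) := by unfold Pre_gpsCount; infer_instance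

def pvWitness_gpsCount : (List (String × String)) × Int × Int :=
  ([("2,0", "["), ("0,1", "]"), ("1,2", "[")], 4, 3)

def Spec_gpsCount (map : List (String × String)) (width : Int) (height : Int) (out : Int) : Prop := out = gpsCount_alt map width height
instance (map : List (String × String)) (width : Int) (height : Int) (out : Int) : Decidable (Spec_gpsCount map width height out) := by unfold Spec_gpsCount; infer_instance

-- ===== CLAIM (what is proved, stated in full; the proofs are below) =====
def Claim_equal_gpsCount : Prop := ∀ (map : List (String × String)) (width : Int) (height : Int), Dom_gpsCount map width height → Pre_gpsCount map width height → Spec_gpsCount map width height (gpsCount map width height)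

-- ===== LEMMAS AND PROOFS =====

def pvGps (o d : Int) : Int := (d + 1) * 100 + (o + 1)

def pvKeyStr (o d : Int) : String := PySem.Int.toStr o ++ "," ++ PySem.Int.toStr d

def pvProbe (map : List (String × String)) (o d : Int) : Int :=
  if pvLookup map (pvKeyStr o d) = some "[" then pvGps o d else 0

def pvSA (map : List (String × String)) (w h : Int) : Int :=
  ((PySem.List.pyRange 0 h 1).map (fun d =>
    ((PySem.List.pyRange 0 w 1).map (fun o => pvProbe map o d)).sum)).sum

def pvEntry (w h : Int) (kv : String × String) : Int :=
  if kv.2 = "[" then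
    match PySem.Chars.splitOn kv.1.toList [','] with
    | [l, r] =>
      match PySem.Int.ofChars? l, PySem.Int.ofChars? r with
      | some ov, some dn => if 0 ≤ ov ∧ ov < w ∧ 0 ≤ dn ∧ dn < h then pvGps ov dn else 0
      | _, _ => 0
    | _ => 0
  else 0

-- decimal-digit facts about Nat.toDigits, used for injectivity of str(n)

lemma pvDigitChar_digit {m : Nat} (h : m < 10) :
    ('0' ≤ Nat.digitChar m ∧ Nat.digitChar m ≤ '9') ∧ (Nat.digitChar m).toNat = 48 + m := by
  interval_cases m <;> exact ⟨by decide, by decide⟩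

lemma pvToDigits_digits (m : Nat) : ∀ c ∈ Nat.toDigits 10 m, '0' ≤ c ∧ c ≤ '9' := by
  induction m using Nat.strong_induction_on with
  | _ m ih =>
    rw [Nat.toDigits_eq_if (by norm_num)]
    split
    · rename_i h; intro c hc; simp at hc; subst hc; exact (pvDigitChar_digit h).1
    · rename_i h
      intro c hc
      rw [List.mem_append] at hc
      rcases hc with hc | hc
      · exact ih (m / 10) (Nat.div_lt_self (by omega) (by norm_num)) c hc
      · simp at hc; subst hc; exact (pvDigitChar_digit (Nat.mod_lt _ (by norm_num))).1

-- the evaluator used only to show Nat.toDigits 10 is injective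
def pvDigitsVal (acc : Int) (cs : List Char) : Int :=
  match cs with
  | [] => acc
  | c :: rest => pvDigitsVal (10 * acc + ((c.toNat : Int) - 48)) rest

lemma pvDigitsVal_append (xs ys : List Char) : ∀ acc : Int,
    pvDigitsVal acc (xs ++ ys) = pvDigitsVal (pvDigitsVal acc xs) ys := by
  induction xs with
  | nil => intro acc; simp [pvDigitsVal]
  | cons c rest ih => intro acc; simp only [List.cons_append, pvDigitsVal]; exact ih _

lemma pvDigitsVal_toDigits (m : Nat) : ∀ acc : Int,
    pvDigitsVal acc (Nat.toDigits 10 m) =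
      (10 : Int) ^ (Nat.toDigits 10 m).length * acc + m := by
  induction m using Nat.strong_induction_on with
  | _ m ih =>
    intro acc
    rw [Nat.toDigits_eq_if (by norm_num)]
    split
    · rename_i h
      have ht := (pvDigitChar_digit h).2
      simp only [pvDigitsVal, List.length_cons, List.length_nil]
      have : ((Nat.digitChar m).toNat : Int) = 48 + m := by exact_mod_cast ht
      rw [this]; ring
    · rename_i h
      have hlt : m / 10 < m := Nat.div_lt_self (by omega) (by norm_num)
      rw [pvDigitsVal_append, ih (m / 10) hlt acc]
      have h10 : m % 10 < 10 := Nat.mod_lt _ (by norm_num)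
      have ht := (pvDigitChar_digit h10).2
      simp only [pvDigitsVal]
      have h1 : ((Nat.digitChar (m % 10)).toNat : Int) = 48 + (m % 10 : Nat) := by
        exact_mod_cast ht
      have h2 : (m : Int) = 10 * ((m / 10 : Nat) : Int) + ((m % 10 : Nat) : Int) := by
        exact_mod_cast (Nat.div_add_mod m 10).symm
      simp only [List.length_append, List.length_cons, List.length_nil]
      rw [h1, h2, pow_succ]
      ring

lemma pvToDigits_inj {m n : Nat} (h : Nat.toDigits 10 m = Nat.toDigits 10 n) : m = n := by
  have h1 := pvDigitsVal_toDigits m 0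
  have h2 := pvDigitsVal_toDigits n 0
  rw [h, h2] at h1
  simp at h1
  exact_mod_cast h1.symm

lemma pvToChars_inj {a b : Int} (h : PySem.Int.toChars a = PySem.Int.toChars b) : a = b := by
  unfold PySem.Int.toChars at h
  by_cases ha : a < 0 <;> by_cases hb : b < 0
  · rw [if_pos ha, if_pos hb] at h
    injection h with _ h
    have := pvToDigits_inj h
    omega
  · rw [if_pos ha, if_neg hb] at h
    exfalso
    have : '-' ∈ Nat.toDigits 10 b.toNat := by rw [← h]; simp
    have := pvToDigits_digits b.toNat '-' this
    revert this; decide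
  · rw [if_neg ha, if_pos hb] at h
    exfalso
    have : '-' ∈ Nat.toDigits 10 a.toNat := by rw [h]; simp
    have := pvToDigits_digits a.toNat '-' this
    revert this; decide
  · rw [if_neg ha, if_neg hb] at h
    have := pvToDigits_inj h
    omega

lemma pvNoCommaDigits (m : Nat) : ',' ∉ Nat.toDigits 10 m := by
  intro hm
  have := pvToDigits_digits m ',' hm
  revert this; decide

lemma pvNoComma (n : Int) : ',' ∉ PySem.Int.toChars n := by
  unfold PySem.Int.toChars
  split
  · intro hm
    rcases List.mem_cons.mp hm with hm | hm
    · exact absurd hm (by decide)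
    · exact pvNoCommaDigits _ hm
  · exact pvNoCommaDigits _

-- splitOn on a single-comma separator, characterised by the one-pass splitter pvSplit1

def pvSplit1 : List Char → List (List Char)
  | [] => [[]]
  | c :: rest => if c = ',' then [] :: pvSplit1 rest else (pvSplit1 rest).modifyHead (c :: ·)

lemma pvSplit1_ne_nil (s : List Char) : pvSplit1 s ≠ [] := by
  induction s with
  | nil => simp [pvSplit1]
  | cons c rest ih =>
    simp only [pvSplit1]
    split
    · simp
    · cases h : pvSplit1 rest with
      | nil => exact absurd h ih
      | cons a t => simp [List.modifyHead]

lemma pvModifyHead_nil_append {α : Type} (l : List (List α)) :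
    l.modifyHead (fun x => [] ++ x) = l := by
  cases l <;> simp

lemma pvModifyHead_comp {α : Type} (f g : List α → List α) (l : List (List α)) :
    (l.modifyHead g).modifyHead f = l.modifyHead (fun x => f (g x)) := by
  cases l <;> simp

lemma pvSplitOn_go_eq : ∀ (fuel : Nat) (s cur : List Char) (acc : List (List Char)),
    s.length ≤ fuel →
    PySem.Chars.splitOn.go [','] fuel s cur acc =
      acc.reverse ++ (pvSplit1 s).modifyHead (cur.reverse ++ ·) := by
  intro fuel
  induction fuel with
  | zero =>
    intro s cur acc hs
    have : s = [] := List.length_eq_zero_iff.mp (Nat.le_zero.mp hs)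
    subst this
    simp [PySem.Chars.splitOn.go, pvSplit1]
  | succ fuel ih =>
    intro s cur acc hs
    cases s with
    | nil => simp [PySem.Chars.splitOn.go, pvSplit1]
    | cons c rest =>
      rw [PySem.Chars.splitOn.go]
      by_cases hc : c = ','
      · subst hc
        rw [if_pos (by simp [List.isPrefixOf])]
        simp only [List.length_cons, List.length_nil, List.drop_succ_cons, List.drop_zero]
        rw [ih rest [] ((List.reverse cur) :: acc) (by simpa using hs)]
        simp only [pvSplit1, List.reverse_cons, List.reverse_nil]
        rw [pvModifyHead_nil_append]
        simp [List.modifyHead]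
      · rw [if_neg (by simp [List.isPrefixOf, Ne.symm hc])]
        rw [ih rest (c :: cur) acc (by simpa using hs)]
        simp only [pvSplit1, if_neg hc, List.reverse_cons]
        rw [pvModifyHead_comp]
        have : (fun x => cur.reverse ++ [c] ++ x) = (fun x : List Char => cur.reverse ++ c :: x) := by
          funext x; simp
        rw [this]

lemma pvSplitOn_eq (s : List Char) : PySem.Chars.splitOn s [','] = pvSplit1 s := by
  unfold PySem.Chars.splitOn
  rw [pvSplitOn_go_eq (s.length + 1) s [] [] (by omega)]
  simp only [List.reverse_nil, List.nil_append]
  exact pvModifyHead_nil_append _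

lemma pvSplit1_no_comma {b : List Char} (h : ',' ∉ b) : pvSplit1 b = [b] := by
  induction b with
  | nil => rfl
  | cons c rest ih =>
    have hc : c ≠ ',' := fun hc => h (by simp [hc])
    simp only [pvSplit1, if_neg hc, ih (fun hm => h (by simp [hm]))]
    rfl

lemma pvSplit1_append {a b : List Char} (ha : ',' ∉ a) (hb : ',' ∉ b) :
    pvSplit1 (a ++ ',' :: b) = [a, b] := by
  induction a with
  | nil => simp [pvSplit1, pvSplit1_no_comma hb]
  | cons c rest ih =>
    have hc : c ≠ ',' := fun hc => ha (by simp [hc])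
    simp only [List.cons_append, pvSplit1, if_neg hc, ih (fun hm => ha (by simp [hm]))]
    rfl

lemma pvSplit1_singleton {s x : List Char} (h : pvSplit1 s = [x]) : s = x := by
  induction s generalizing x with
  | nil =>
    simp only [pvSplit1] at h
    injection h with h1 _
  | cons c rest ih =>
    simp only [pvSplit1] at h
    split at h
    · rename_i hc
      exfalso
      injection h with h1 h2
      exact pvSplit1_ne_nil rest h2
    · rename_i hc
      cases hrec : pvSplit1 rest with
      | nil => exact absurd hrec (pvSplit1_ne_nil rest)
      | cons y t =>
        rw [hrec] at h
        simp [List.modifyHead] at h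
        obtain ⟨h1, h2⟩ := h
        have : pvSplit1 rest = [y] := by rw [hrec, h2]
        rw [ih this, ← h1]

lemma pvSplit1_pair {s l r : List Char} (h : pvSplit1 s = [l, r]) : s = l ++ ',' :: r := by
  induction s generalizing l r with
  | nil => simp [pvSplit1] at h
  | cons c rest ih =>
    simp only [pvSplit1] at h
    split at h
    · rename_i hc
      injection h with h1 h2
      subst hc
      rw [← h1, List.nil_append]
      congr 1
      exact pvSplit1_singleton h2
    · rename_i hc
      cases hrec : pvSplit1 rest with
      | nil => exact absurd hrec (pvSplit1_ne_nil rest)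
      | cons y t =>
        rw [hrec] at h
        simp [List.modifyHead] at h
        obtain ⟨h1, h2⟩ := h
        have : pvSplit1 rest = [y, r] := by rw [hrec, h2]
        rw [← h1, ih this]
        rfl

lemma pvKeyStr_toList (o d : Int) :
    (pvKeyStr o d).toList = PySem.Int.toChars o ++ ',' :: PySem.Int.toChars d := by
  unfold pvKeyStr PySem.Int.toStr
  simp

lemma pvKeyStr_split (o d : Int) :
    PySem.Chars.splitOn (pvKeyStr o d).toList [','] =
      [PySem.Int.toChars o, PySem.Int.toChars d] := by
  rw [pvKeyStr_toList, pvSplitOn_eq, pvSplit1_append (pvNoComma o) (pvNoComma d)]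

lemma pvKeyStr_inj {o d o' d' : Int} (h : pvKeyStr o' d' = pvKeyStr o d) :
    o' = o ∧ d' = d := by
  have hl : (pvKeyStr o' d').toList = (pvKeyStr o d).toList := by rw [h]
  rw [pvKeyStr_toList, pvKeyStr_toList] at hl
  have h1 : pvSplit1 (PySem.Int.toChars o' ++ ',' :: PySem.Int.toChars d') =
      [PySem.Int.toChars o, PySem.Int.toChars d] := by
    rw [hl, pvSplit1_append (pvNoComma o) (pvNoComma d)]
  rw [pvSplit1_append (pvNoComma o') (pvNoComma d')] at h1
  injection h1 with h2 h3
  injection h3 with h3 _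
  exact ⟨pvToChars_inj h2, pvToChars_inj h3⟩

lemma pvMapGetD_true {α : Type} {ob : Option α} {f : α → Bool}
    (h : ((ob.map f).getD false) = true) : ∃ n, ob = some n ∧ f n = true := by
  cases ob with
  | none => simp at h
  | some n => exact ⟨n, rfl, by simpa using h⟩

-- a canonical key is pvKeyStr o d with both parts parsed back by int()
lemma pvCanonKey_spec {k : String} (h : pvCanonKey k = true) :
    ∃ o d : Int, k = pvKeyStr o d ∧
      PySem.Int.ofChars? (PySem.Int.toChars o) = some o ∧
      PySem.Int.ofChars? (PySem.Int.toChars d) = some d := by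
  unfold pvCanonKey at h
  cases hsp : PySem.Chars.splitOn k.toList [','] with
  | nil => rw [hsp] at h; exact absurd h (by simp)
  | cons l t =>
    cases t with
    | nil => rw [hsp] at h; exact absurd h (by simp)
    | cons r t2 =>
      cases t2 with
      | cons _ _ => rw [hsp] at h; exact absurd h (by simp)
      | nil =>
        rw [hsp] at h
        simp only [pvCanonPart, List.getD_cons_zero, List.getD_cons_succ,
          Bool.and_eq_true] at h
        obtain ⟨⟨-, hl⟩, hr⟩ := h
        obtain ⟨o, hlo, hle'⟩ := pvMapGetD_true hl
        obtain ⟨d, hro, hre'⟩ := pvMapGetD_true hr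
        have hle : PySem.Int.toChars o = l := by simpa using hle'
        have hre : PySem.Int.toChars d = r := by simpa using hre'
        refine ⟨o, d, ?_, by rw [hle]; exact hlo, by rw [hre]; exact hro⟩
        have hk : k.toList = (pvKeyStr o d).toList := by
          rw [pvKeyStr_toList, hle, hre]
          rw [pvSplitOn_eq] at hsp
          exact pvSplit1_pair hsp
        exact String.toList_inj.mp hk

lemma pvFoldlIfAdd {α : Type} (p : α → Prop) [DecidablePred p] (f : α → Int) :
    ∀ (l : List α) (init : Int),
      l.foldl (fun c x => if p x then c + f x else c) init =
        init + (l.map fun x => if p x then f x else 0).sum := by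
  intro l
  induction l with
  | nil => intro init; simp
  | cons x t ih =>
    intro init
    simp only [List.foldl_cons, List.map_cons, List.sum_cons]
    by_cases hx : p x
    · rw [if_pos hx, if_pos hx, ih]; ring
    · rw [if_neg hx, if_neg hx, ih]; ring

lemma pvSumInd {α : Type} [DecidableEq α] {l : List α} (hl : l.Nodup) (x : α) (g : α → Int) :
    (l.map fun y => if y = x then g y else 0).sum = if x ∈ l then g x else 0 := by
  induction l with
  | nil => simp
  | cons a t ih =>
    simp only [List.map_cons, List.sum_cons, List.mem_cons]
    have hnd := List.nodup_cons.mp hl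
    by_cases hax : a = x
    · subst hax
      rw [if_pos rfl, if_pos (Or.inl rfl)]
      have : (t.map fun y => if y = a then g y else 0).sum = 0 := by
        rw [ih hnd.2]
        exact if_neg hnd.1
      rw [this, add_zero]
    · rw [if_neg hax, ih hnd.2, zero_add]
      by_cases hxt : x ∈ t
      · rw [if_pos hxt, if_pos (Or.inr hxt)]
      · rw [if_neg hxt, if_neg (by tauto)]

lemma pvA_sum (map : List (String × String)) (w h : Int) :
    gpsCount map w h = pvSA map w h := by
  unfold gpsCount pvSA
  have hinner : ∀ (c d : Int),
      (PySem.List.pyRange 0 w 1).foldl (fun count ov =>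
        if pvLookup map (PySem.Int.toStr ov ++ "," ++ PySem.Int.toStr d) = some "[" then
          count + ((d + 1) * 100 + (ov + 1))
        else count) c =
      c + ((PySem.List.pyRange 0 w 1).map (fun o => pvProbe map o d)).sum := by
    intro c d
    rw [pvFoldlIfAdd (fun ov => pvLookup map (PySem.Int.toStr ov ++ "," ++ PySem.Int.toStr d) = some "[")
      (fun ov => (d + 1) * 100 + (ov + 1)) _ c]
    rfl
  have hb : (fun count down =>
      (PySem.List.pyRange 0 w 1).foldl (fun count ov =>
        if pvLookup map (PySem.Int.toStr ov ++ "," ++ PySem.Int.toStr down) = some "[" then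
          count + ((down + 1) * 100 + (ov + 1))
        else count) count) =
      (fun c d => c + ((PySem.List.pyRange 0 w 1).map (fun o => pvProbe map o d)).sum) := by
    funext c d
    exact hinner c d
  rw [hb, PySem.List.foldl_add]
  simp

lemma pvB_sum (map : List (String × String)) (w h : Int) :
    gpsCount_alt map w h = (map.map (pvEntry w h)).sum := by
  unfold gpsCount_alt
  have hb : (fun (total : Int) (kv : String × String) =>
      if kv.2 = "[" then
        match PySem.Chars.splitOn kv.1.toList [','] with
        | [l, r] =>
          match PySem.Int.ofChars? l, PySem.Int.ofChars? r with
          | some ov, some dn =>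
            if 0 ≤ ov ∧ ov < w ∧ 0 ≤ dn ∧ dn < h then total + ((dn + 1) * 100 + (ov + 1))
            else total
          | _, _ => total
        | _ => total
      else total) = (fun total kv => total + pvEntry w h kv) := by
    funext total kv
    unfold pvEntry
    by_cases hv : kv.2 = "["
    · rw [if_pos hv, if_pos hv]
      cases hsp : PySem.Chars.splitOn kv.1.toList [','] with
      | nil => simp
      | cons l t =>
        cases t with
        | nil => simp
        | cons r t2 =>
          cases t2 with
          | cons _ _ => simp
          | nil =>
            simp only
            cases hl : PySem.Int.ofChars? l with
            | none => simp
            | some o =>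
              cases hr : PySem.Int.ofChars? r with
              | none => simp
              | some d =>
                simp only
                by_cases hbnd : 0 ≤ o ∧ o < w ∧ 0 ≤ d ∧ d < h
                · rw [if_pos hbnd, if_pos hbnd]; rfl
                · rw [if_neg hbnd, if_neg hbnd]; ring
    · rw [if_neg hv, if_neg hv]; ring
  rw [hb, PySem.List.foldl_add]
  simp

lemma pvLookup_eq_none {map : List (String × String)} {k : String}
    (h : k ∉ map.map Prod.fst) : pvLookup map k = none := by
  induction map with
  | nil => rfl
  | cons kv rest ih =>
    obtain ⟨k', v⟩ := kv
    simp only [List.map_cons, List.mem_cons] at h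
    push Not at h
    have hne : ¬ k' = k := fun he => h.1 (Eq.symm he)
    simp only [pvLookup, if_neg hne]
    exact ih h.2

lemma pvT (k v : String) (w h : Int) (hcv : v = "[" → pvCanonKey k = true) :
    ((PySem.List.pyRange 0 h 1).map (fun d =>
      ((PySem.List.pyRange 0 w 1).map (fun o =>
        if pvKeyStr o d = k then (if v = "[" then pvGps o d else 0) else 0)).sum)).sum
      = pvEntry w h (k, v) := by
  by_cases hv : v = "["
  · subst hv
    simp only [if_true]
    obtain ⟨o0, d0, hk, hlo, hro⟩ := pvCanonKey_spec (hcv rfl)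
    have houter : ∀ d ∈ PySem.List.pyRange 0 h 1,
        ((PySem.List.pyRange 0 w 1).map (fun o =>
          if pvKeyStr o d = k then pvGps o d else 0)).sum =
        (if d = d0 then (if o0 ∈ PySem.List.pyRange 0 w 1 then pvGps o0 d else 0) else 0) := by
      intro d hd
      have hin : ∀ o ∈ PySem.List.pyRange 0 w 1,
          (if pvKeyStr o d = k then pvGps o d else 0) =
          (if o = o0 then (if d = d0 then pvGps o d else 0) else 0) := by
        intro o _
        by_cases heq : pvKeyStr o d = k
        · have heq' : pvKeyStr o d = pvKeyStr o0 d0 := by rw [← hk]; exact heq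
          obtain ⟨he1, he2⟩ := pvKeyStr_inj heq'
          rw [if_pos heq, if_pos he1, if_pos he2]
        · rw [if_neg heq]
          by_cases he1 : o = o0
          · by_cases he2 : d = d0
            · exfalso; apply heq; rw [he1, he2, ← hk]
            · rw [if_pos he1, if_neg he2]
          · rw [if_neg he1]
      rw [List.map_congr_left hin,
        pvSumInd (PySem.List.nodup_pyRange_one 0 w) o0 (fun o => if d = d0 then pvGps o d else 0)]
      by_cases he2 : d = d0
      · simp [he2]
      · simp [he2]
    rw [List.map_congr_left houter,
      pvSumInd (PySem.List.nodup_pyRange_one 0 h) d0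
        (fun d => if o0 ∈ PySem.List.pyRange 0 w 1 then pvGps o0 d else 0)]
    simp only [pvEntry, hk, if_true, PySem.List.mem_pyRange_one, pvKeyStr_split, hlo, hro]
    split_ifs <;> first | rfl | (exfalso; omega)
  · have : ∀ d ∈ PySem.List.pyRange 0 h 1,
        ((PySem.List.pyRange 0 w 1).map (fun o =>
          if pvKeyStr o d = k then (if v = "[" then pvGps o d else 0) else 0)).sum = 0 := by
      intro d _
      simp [hv]
    rw [List.map_congr_left this]
    simp [pvEntry, hv]

lemma pvStep {k v : String} {rest : List (String × String)} (hk : k ∉ rest.map Prod.fst)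
    (hcv : v = "[" → pvCanonKey k = true) (w h : Int) :
    pvSA ((k, v) :: rest) w h = pvSA rest w h + pvEntry w h (k, v) := by
  have hpoint : ∀ o d : Int, pvProbe ((k, v) :: rest) o d =
      pvProbe rest o d + (if pvKeyStr o d = k then (if v = "[" then pvGps o d else 0) else 0) := by
    intro o d
    unfold pvProbe
    by_cases he : pvKeyStr o d = k
    · have h1 : pvLookup ((k, v) :: rest) (pvKeyStr o d) = some v := by
        simp [pvLookup, he.symm]
      have h2 : pvLookup rest (pvKeyStr o d) = none := by
        rw [he]; exact pvLookup_eq_none hk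
      rw [h1, h2, if_pos he]
      simp [Option.some.injEq]
    · have h1 : pvLookup ((k, v) :: rest) (pvKeyStr o d) = pvLookup rest (pvKeyStr o d) := by
        simp [pvLookup, if_neg (fun hx => he (Eq.symm hx))]
      rw [h1, if_neg he, add_zero]
  unfold pvSA
  simp only [hpoint]
  have hsplit : ∀ d : Int,
      ((PySem.List.pyRange 0 w 1).map (fun o =>
        pvProbe rest o d + (if pvKeyStr o d = k then (if v = "[" then pvGps o d else 0) else 0))).sum =
      ((PySem.List.pyRange 0 w 1).map (fun o => pvProbe rest o d)).sum +
      ((PySem.List.pyRange 0 w 1).map (fun o =>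
        if pvKeyStr o d = k then (if v = "[" then pvGps o d else 0) else 0)).sum := by
    intro d
    exact PySem.List.sum_map_add_int _ _ _
  simp only [hsplit]
  rw [PySem.List.sum_map_add_int]
  rw [pvT k v w h hcv]

lemma pvMain (map : List (String × String)) (w h : Int) (hnd : (map.map Prod.fst).Nodup)
    (hc : ∀ kv ∈ map, kv.2 = "[" → pvCanonKey kv.1 = true) :
    pvSA map w h = (map.map (pvEntry w h)).sum := by
  induction map with
  | nil => simp [pvSA, pvProbe, pvLookup]
  | cons kv rest ih =>
    obtain ⟨k, v⟩ := kv
    simp only [List.map_cons, List.nodup_cons] at hnd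
    rw [pvStep hnd.1 (hc (k, v) (by simp)) w h,
      ih hnd.2 (fun kv hkv => hc kv (by simp [hkv]))]
    simp only [List.map_cons, List.sum_cons]
    ring

-- ===== VERDICT (by name: the statement is the Claim_ definition above) =====
theorem gpsCount_spec : Claim_equal_gpsCount := by
  intro map w h _ hpre
  unfold Spec_gpsCount
  rw [pvA_sum, pvB_sum, pvMain map w h hpre.1 hpre.2]
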